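-- pv_equiv track=rewrite | github.com/avsmith/adventofcode | 2018/day02.py | twothree
-- ===== SOURCE A (Python) =====
-- import collections
--
-- def twothree(w):
--     d = collections.defaultdict(int)
--     two = False
--     three = False
--     for c in w:
--         d[c] += 1
--     for char in d:
--         if d[char] == 2:
--             two = True
--         if d[char] == 3:
--             three = True
--     return [two, three]
-- ===== SOURCE B (Python) =====
-- def twothree(w):
--     s = sorted(w)
--     two = False
--     three = False
--     i = 0
--     n = len(s)
--     while i < n:
--         j = i
--         while j < n and s[j] == s[i]:
--             j += 1
--         run = j - i
--         if run == 2: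
--             two = True
--         elif run == 3:
--             three = True
--         i = j
--     return [two, three]
-- ===== Notes on version B (the rewrite author's own statement) =====
-- stated objective: alternative
-- what changed: B replaces A's frequency dictionary with sort-then-scan: it sorts the characters and walks consecutive runs of equal characters, flagging a run of length 2 or 3.
import Mathlib
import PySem

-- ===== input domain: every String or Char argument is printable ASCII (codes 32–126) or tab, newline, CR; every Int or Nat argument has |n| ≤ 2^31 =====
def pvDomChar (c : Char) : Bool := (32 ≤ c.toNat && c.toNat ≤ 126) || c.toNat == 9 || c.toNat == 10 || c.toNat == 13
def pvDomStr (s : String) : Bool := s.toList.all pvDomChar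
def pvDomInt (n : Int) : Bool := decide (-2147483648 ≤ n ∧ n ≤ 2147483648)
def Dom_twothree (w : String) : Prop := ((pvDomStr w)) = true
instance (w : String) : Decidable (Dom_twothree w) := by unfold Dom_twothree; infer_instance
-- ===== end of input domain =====

-- B replaces A's frequency dictionary with sort-then-scan over runs of equal characters (alternative decomposition, same cost class).

-- ===== PORT A =====
-- d = defaultdict(int); for c in w: d[c] += 1 ; then for char in d: set the flags
def twothree (w : String) : List Bool :=
  let d := w.toList.foldl (fun d c => d.modify c 0 (· + 1)) (PySem.Dict.empty : PySem.Dict Char Int)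
  let st := d.keys.foldl
    (fun (st : Bool × Bool) ch =>
      ((if d.getD ch 0 = 2 then true else st.1),
       (if d.getD ch 0 = 3 then true else st.2)))
    (false, false)
  [st.1, st.2]

-- ===== PORT B =====
-- Source B's outer while loop: each step consumes the maximal front run of equal characters
-- (the inner while loop that finds j = end of the run is the takeWhile/dropWhile split)
def runScan : List Char → Bool → Bool → List Bool
  | [], two, three => [two, three]
  | c :: rest, two, three =>
      let run := 1 + (rest.takeWhile (· == c)).length
      let rest' := rest.dropWhile (· == c)
      runScan rest'
        (if run = 2 then true else two)
        (if run = 2 then three else if run = 3 then true else three)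
  termination_by l => l.length
  decreasing_by
    simp only [List.length_cons]
    exact Nat.lt_succ_of_le (List.length_dropWhile_le _ _)

def twothree_alt (w : String) : List Bool :=
  runScan (PySem.List.sorted w.toList (fun c => c) false) false false

-- ===== PRECONDITION & SPEC =====
def Spec_twothree (w : String) (out : List Bool) : Prop := out = twothree_alt w
instance (w : String) (out : List Bool) : Decidable (Spec_twothree w out) := by unfold Spec_twothree; infer_instance

-- ===== CLAIM (what is proved, stated in full; the proofs are below) =====
def Claim_equal_twothree : Prop := ∀ (w : String), Dom_twothree w → Spec_twothree w (twothree w)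

-- ===== LEMMAS AND PROOFS =====

-- in a sorted list c :: rest, the occurrences of c are exactly the front run
lemma sorted_run (c : Char) (rest : List Char)
    (hs : (c :: rest).Pairwise (· ≤ ·)) :
    rest.takeWhile (· == c) = List.replicate (rest.count c) c ∧
    c ∉ rest.dropWhile (· == c) ∧
    (rest.dropWhile (· == c)).Pairwise (· ≤ ·) := by
  induction rest with
  | nil => simp
  | cons x t ih =>
      rcases List.pairwise_cons.mp hs with ⟨hc, ht⟩
      by_cases hx : x = c
      · subst hx
        have hs' : (x :: t).Pairwise (· ≤ ·) := by
          refine List.pairwise_cons.mpr ⟨fun y hy => hc y (by simp [hy]), (List.pairwise_cons.mp ht).2⟩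
        rcases ih hs' with ⟨h1, h2, h3⟩
        refine ⟨?_, ?_, ?_⟩
        · simp [List.takeWhile, h1, List.replicate_succ]
        · simpa [List.dropWhile] using h2
        · simpa [List.dropWhile] using h3
      · have hcx : c < x := lt_of_le_of_ne (hc x (by simp)) (fun h => hx h.symm)
        have hnotmem : c ∉ x :: t := by
          intro hmem
          rcases List.mem_cons.mp hmem with h | h
          · exact hx h.symm
          · exact absurd ((List.pairwise_cons.mp ht).1 c h) (not_le.mpr hcx)
        have hcnt : (x :: t).count c = 0 := List.count_eq_zero.mpr hnotmem
        have hbe : (x == c) = false := by simp [hx]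
        refine ⟨?_, ?_, ?_⟩
        · simp [List.takeWhile, hbe, hcnt]
        · simpa [List.dropWhile, hbe] using hnotmem
        · simpa [List.dropWhile, hbe] using ht

-- B's scan of a sorted list sets each flag iff some character has that count
lemma runScan_eq : ∀ (l : List Char), l.Pairwise (· ≤ ·) → ∀ (two three : Bool),
    runScan l two three =
      [two || l.any (fun x => decide (l.count x = 2)),
       three || l.any (fun x => decide (l.count x = 3))]
  | [], _, two, three => by simp [runScan]
  | c :: rest, hs, two, three => by
      obtain ⟨h1, h2, h3⟩ := sorted_run c rest hs
      have hsplit : rest = List.replicate (rest.count c) c ++ rest.dropWhile (· == c) := by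
        conv_lhs => rw [← List.takeWhile_append_dropWhile (p := (· == c)) (l := rest)]
        rw [h1]
      have hlen : (rest.takeWhile (· == c)).length = rest.count c := by rw [h1]; simp
      have hcount_c : (c :: rest).count c = rest.count c + 1 := by simp
      have hcount_ne : ∀ x, x ≠ c → (c :: rest).count x = (rest.dropWhile (· == c)).count x := by
        intro x hx
        conv_lhs => rw [List.count_cons, hsplit]
        rw [List.count_append, List.count_replicate]
        simp [if_neg (Ne.symm hx)]
      have hiff : ∀ n : Nat,
          (∃ x ∈ c :: rest, (c :: rest).count x = n) ↔
          (rest.count c + 1 = n ∨ ∃ x ∈ rest.dropWhile (· == c), (rest.dropWhile (· == c)).count x = n) := by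
        intro n
        constructor
        · rintro ⟨x, hxm, hxc⟩
          by_cases hx : x = c
          · subst hx; left; rw [hcount_c] at hxc; exact hxc
          · right
            have hxr : x ∈ rest.dropWhile (· == c) := by
              rcases List.mem_cons.mp hxm with h | h
              · exact absurd h hx
              · rw [hsplit] at h
                rcases List.mem_append.mp h with h | h
                · exact absurd (List.eq_of_mem_replicate h) hx
                · exact h
            exact ⟨x, hxr, by rw [← hcount_ne x hx]; exact hxc⟩
        · rintro (h | ⟨x, hxm, hxc⟩)
          · exact ⟨c, by simp, by rw [hcount_c]; exact h⟩
          · have hx : x ≠ c := fun he => h2 (he ▸ hxm)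
            refine ⟨x, ?_, by rw [hcount_ne x hx]; exact hxc⟩
            exact List.mem_cons_of_mem _ (hsplit ▸ List.mem_append_right _ hxm)
      have hany : ∀ n : Nat,
          (c :: rest).any (fun x => decide ((c :: rest).count x = n)) =
          (decide (rest.count c + 1 = n) ||
           (rest.dropWhile (· == c)).any (fun x => decide ((rest.dropWhile (· == c)).count x = n))) := by
        intro n
        rw [Bool.eq_iff_iff]
        simp only [List.any_eq_true, decide_eq_true_eq, Bool.or_eq_true]
        exact (hiff n).trans (by tauto)
      rw [runScan]
      rw [runScan_eq (rest.dropWhile (· == c)) h3]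
      rw [hlen]
      by_cases e2 : 1 + rest.count c = 2 <;> by_cases e3 : 1 + rest.count c = 3
      · omega
      · simp [e2, hany, show rest.count c + 1 = 2 from by omega]
      · simp [e3, hany, show rest.count c + 1 = 3 from by omega]
      · simp [e2, e3, hany, show ¬(rest.count c + 1 = 2) from by omega, show ¬(rest.count c + 1 = 3) from by omega]
  termination_by l => l.length
  decreasing_by
    simp only [List.length_cons]
    exact Nat.lt_succ_of_le (List.length_dropWhile_le _ _)

-- A's second loop sets each flag iff some key satisfies its test
lemma foldl_flags (l : List Char) (p q : Char → Prop) [DecidablePred p] [DecidablePred q]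
    (a b : Bool) :
    l.foldl (fun (st : Bool × Bool) ch =>
      ((if p ch then true else st.1), (if q ch then true else st.2))) (a, b)
    = (a || l.any (fun ch => decide (p ch)), b || l.any (fun ch => decide (q ch))) := by
  induction l generalizing a b with
  | nil => simp
  | cons c t ih =>
      simp only [List.foldl_cons, List.any_cons, ih]
      by_cases hp : p c <;> by_cases hq : q c <;> simp [hp, hq]

-- ===== VERDICT (by name: the statement is the Claim_ definition above) =====
theorem twothree_spec : Claim_equal_twothree := by
  intro w _
  unfold Spec_twothree twothree twothree_alt
  dsimp only
  have hcnt : w.toList.foldl (fun d c => d.modify c 0 (· + 1)) (PySem.Dict.empty : PySem.Dict Char Int)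
      = PySem.Dict.counter w.toList := (PySem.Dict.counter_eq_foldl w.toList).symm
  rw [hcnt]
  rw [foldl_flags]
  rw [runScan_eq _ (PySem.List.sorted_pairwise w.toList (fun c => c))]
  have hperm := PySem.List.sorted_perm w.toList (fun c => c) false
  have hmem : ∀ x, x ∈ PySem.List.sorted w.toList (fun c => c) false ↔ x ∈ w.toList :=
    fun x => hperm.mem_iff
  have hc : ∀ x, (PySem.List.sorted w.toList (fun c => c) false).count x = w.toList.count x :=
    fun x => hperm.count_eq x
  have key : ∀ n : Nat,
      ((PySem.Dict.counter w.toList).keys.any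
        (fun ch => decide ((PySem.Dict.counter w.toList).getD ch 0 = (n : Int))))
      = ((PySem.List.sorted w.toList (fun c => c) false).any
        (fun x => decide ((PySem.List.sorted w.toList (fun c => c) false).count x = n))) := by
    intro n
    rw [Bool.eq_iff_iff]
    simp only [List.any_eq_true, decide_eq_true_eq, PySem.Dict.keys_counter,
      PySem.Set.mem_ofList, PySem.Dict.getD_counter, hmem, hc, Nat.cast_inj]
  simp only [show ((2:Int) = ((2:Nat):Int)) from rfl, show ((3:Int) = ((3:Nat):Int)) from rfl]
  rw [key 2, key 3]
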